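-- pv_equiv track=rewrite | github.com/firadio/akatm | api/admin/add_swagger_tags.py | get_tag_for_path
-- ===== SOURCE A (Python) =====
-- PATH_TAG_MAPPING = {
--     # Admin RPC - 认证
--     '/api/admin/auth': {'tag': '管理端-认证', 'order': 1},
--
--     # Admin RPC - 系统管理
--     '/api/admin/system/user': {'tag': '管理端-系统管理-用户', 'order': 2},
--     '/api/admin/system/role': {'tag': '管理端-系统管理-角色', 'order': 3},
--     '/api/admin/system/menu': {'tag': '管理端-系统管理-菜单', 'order': 4},
--     '/api/admin/system/config': {'tag': '管理端-系统管理-配置', 'order': 5},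
--     '/api/admin/system/audit': {'tag': '管理端-系统管理-审计日志', 'order': 6},
--
--     # Admin RPC - 数据管理
--     '/api/admin/data/country': {'tag': '管理端-数据管理-国家', 'order': 7},
--
--     # Admin RPC - 仪表板
--     '/api/admin/dashboard': {'tag': '管理端-仪表板', 'order': 8},
--
--     # IAM RPC - 用户管理
--     '/api/iam/user': {'tag': 'IAM-用户管理', 'order': 10},
--     '/api/iam/user/profile': {'tag': 'IAM-用户档案', 'order': 11},
--     '/api/iam/user/email': {'tag': 'IAM-邮箱管理', 'order': 12},
--     '/api/iam/user/credential': {'tag': 'IAM-凭证管理', 'order': 13},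
--     '/api/iam/user/session': {'tag': 'IAM-会话管理', 'order': 14},
--     '/api/iam/user/invite': {'tag': 'IAM-邀请管理', 'order': 15},
--     '/api/iam/user/country': {'tag': 'IAM-国家数据', 'order': 16},
--
--     # FAMS RPC - 用户钱包
--     '/api/fams/user/wallet': {'tag': 'FAMS-用户钱包', 'order': 20},
--
--     # FAMS RPC - 银行管理
--     '/api/fams/bank/customer': {'tag': 'FAMS-银行-客户', 'order': 21},
--     '/api/fams/bank/account': {'tag': 'FAMS-银行-账户', 'order': 22},
--     '/api/fams/bank/account/application': {'tag': 'FAMS-银行-开户申请', 'order': 23},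
--     '/api/fams/bank/deposit': {'tag': 'FAMS-银行-存款', 'order': 24},
--     '/api/fams/bank/withdrawal': {'tag': 'FAMS-银行-提现', 'order': 25},
--
--     # FAMS RPC - 代理收益
--     '/api/fams/agent/earnings': {'tag': 'FAMS-代理收益', 'order': 26},
--
--     # FAMS RPC - 报表
--     '/api/fams/user-report': {'tag': 'FAMS-报表-用户报表', 'order': 27},
--     '/api/fams/agent-report': {'tag': 'FAMS-报表-代理报表', 'order': 28},
--
--     # 公开接口
--     '/api/public': {'tag': '公开接口', 'order': 100},
-- }
--
-- def get_tag_for_path(path):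
--     """根据路径获取对应的tag"""
--     # 按照前缀长度从长到短排序，确保匹配最具体的前缀
--     sorted_prefixes = sorted(PATH_TAG_MAPPING.keys(), key=len, reverse=True)
--
--     for prefix in sorted_prefixes:
--         if path.startswith(prefix):
--             return PATH_TAG_MAPPING[prefix]['tag']
--
--     # 默认返回路径的第二和第三段作为tag
--     parts = path.strip('/').split('/')
--     if len(parts) >= 3:
--         return f"{parts[1]}-{parts[2]}"
--     elif len(parts) >= 2:
--         return parts[1]
--     else:
--         return "其他"
-- ===== SOURCE B (Python) =====
-- # B: instead of sorting the table's keys and scanning them, try the prefixes of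
-- # the path itself from longest possible down, looking each up in a flat
-- # prefix->tag dict; no key of the table is longer than _MAX_PREFIX_LEN, so at
-- # most that many O(1) lookups are made and the table is never scanned.
-- TAG_BY_PREFIX = {
--     '/api/admin/auth': '管理端-认证',
--     '/api/admin/system/user': '管理端-系统管理-用户',
--     '/api/admin/system/role': '管理端-系统管理-角色',
--     '/api/admin/system/menu': '管理端-系统管理-菜单',
--     '/api/admin/system/config': '管理端-系统管理-配置',
--     '/api/admin/system/audit': '管理端-系统管理-审计日志',
--     '/api/admin/data/country': '管理端-数据管理-国家',
--     '/api/admin/dashboard': '管理端-仪表板',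
--     '/api/iam/user': 'IAM-用户管理',
--     '/api/iam/user/profile': 'IAM-用户档案',
--     '/api/iam/user/email': 'IAM-邮箱管理',
--     '/api/iam/user/credential': 'IAM-凭证管理',
--     '/api/iam/user/session': 'IAM-会话管理',
--     '/api/iam/user/invite': 'IAM-邀请管理',
--     '/api/iam/user/country': 'IAM-国家数据',
--     '/api/fams/user/wallet': 'FAMS-用户钱包',
--     '/api/fams/bank/customer': 'FAMS-银行-客户',
--     '/api/fams/bank/account': 'FAMS-银行-账户',
--     '/api/fams/bank/account/application': 'FAMS-银行-开户申请',
--     '/api/fams/bank/deposit': 'FAMS-银行-存款',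
--     '/api/fams/bank/withdrawal': 'FAMS-银行-提现',
--     '/api/fams/agent/earnings': 'FAMS-代理收益',
--     '/api/fams/user-report': 'FAMS-报表-用户报表',
--     '/api/fams/agent-report': 'FAMS-报表-代理报表',
--     '/api/public': '公开接口',
-- }
-- _MAX_PREFIX_LEN = max(map(len, TAG_BY_PREFIX))
--
-- def get_tag_for_path(path):
--     """根据路径获取对应的tag：依次尝试 path 自身的各个前缀，由长到短查表"""
--     for L in range(min(len(path), _MAX_PREFIX_LEN), 0, -1):
--         tag = TAG_BY_PREFIX.get(path[:L])
--         if tag is not None: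
--             return tag
--     parts = path.strip('/').split('/')
--     if len(parts) >= 2:
--         return "-".join(parts[1:3])
--     return "其他"
-- ===== Notes on version B (the rewrite author's own statement) =====
-- stated objective: alternative
-- what changed: B never sorts or scans the table's keys: it looks up the path's own prefixes, from the longest possible length (capped by the longest key) down to 1, in a flat prefix->tag dict, and restates the fallback as a single join over parts[1:3].
import Mathlib
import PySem

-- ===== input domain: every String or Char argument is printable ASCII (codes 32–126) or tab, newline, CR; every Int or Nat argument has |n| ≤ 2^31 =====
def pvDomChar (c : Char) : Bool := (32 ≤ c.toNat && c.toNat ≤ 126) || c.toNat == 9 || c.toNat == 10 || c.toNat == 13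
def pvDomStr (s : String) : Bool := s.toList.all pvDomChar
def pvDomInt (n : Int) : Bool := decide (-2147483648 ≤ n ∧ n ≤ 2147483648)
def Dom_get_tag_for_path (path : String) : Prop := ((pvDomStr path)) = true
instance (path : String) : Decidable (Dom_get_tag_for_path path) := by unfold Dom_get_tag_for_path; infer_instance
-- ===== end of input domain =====

-- B replaces A's sort-the-table-keys-then-scan by looking up the path's own prefixes (longest
-- possible length down to 1) in a flat prefix->tag dict; objective: alternative.

-- ===== PORT A =====
-- A's module-level table; the inner {'tag':…, 'order':…} dict has a fixed heterogeneous
-- shape and is ported as a pair (tag, order).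
def PATH_TAG_MAPPING : PySem.Dict String (String × Int) := PySem.Dict.ofList [
  ("/api/admin/auth", ("管理端-认证", 1)),
  ("/api/admin/system/user", ("管理端-系统管理-用户", 2)),
  ("/api/admin/system/role", ("管理端-系统管理-角色", 3)),
  ("/api/admin/system/menu", ("管理端-系统管理-菜单", 4)),
  ("/api/admin/system/config", ("管理端-系统管理-配置", 5)),
  ("/api/admin/system/audit", ("管理端-系统管理-审计日志", 6)),
  ("/api/admin/data/country", ("管理端-数据管理-国家", 7)),
  ("/api/admin/dashboard", ("管理端-仪表板", 8)),
  ("/api/iam/user", ("IAM-用户管理", 10)),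
  ("/api/iam/user/profile", ("IAM-用户档案", 11)),
  ("/api/iam/user/email", ("IAM-邮箱管理", 12)),
  ("/api/iam/user/credential", ("IAM-凭证管理", 13)),
  ("/api/iam/user/session", ("IAM-会话管理", 14)),
  ("/api/iam/user/invite", ("IAM-邀请管理", 15)),
  ("/api/iam/user/country", ("IAM-国家数据", 16)),
  ("/api/fams/user/wallet", ("FAMS-用户钱包", 20)),
  ("/api/fams/bank/customer", ("FAMS-银行-客户", 21)),
  ("/api/fams/bank/account", ("FAMS-银行-账户", 22)),
  ("/api/fams/bank/account/application", ("FAMS-银行-开户申请", 23)),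
  ("/api/fams/bank/deposit", ("FAMS-银行-存款", 24)),
  ("/api/fams/bank/withdrawal", ("FAMS-银行-提现", 25)),
  ("/api/fams/agent/earnings", ("FAMS-代理收益", 26)),
  ("/api/fams/user-report", ("FAMS-报表-用户报表", 27)),
  ("/api/fams/agent-report", ("FAMS-报表-代理报表", 28)),
  ("/api/public", ("公开接口", 100))]

-- A's 'for prefix in sorted_prefixes: if path.startswith(prefix): return …' with the
-- fallback after the loop; the [] case is the code after the loop.  path.strip('/') is
-- stripChars, .split('/') is split? with the nonempty literal separator "/" (never none),
-- PATH_TAG_MAPPING[prefix] is getD (the key always comes from the dict, so the default is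
-- dead), parts[1]/parts[2] are pyGetD (in range under the length guards).
def aLoop (path : String) : List String → String
  | [] =>
    let parts := (PySem.Str.split? (PySem.Str.stripChars path "/") "/").getD []
    if 3 ≤ parts.length then
      PySem.List.pyGetD parts 1 "" ++ "-" ++ PySem.List.pyGetD parts 2 ""
    else if 2 ≤ parts.length then
      PySem.List.pyGetD parts 1 ""
    else
      "其他"
  | p :: rest =>
    if PySem.Str.startswith path p then (PySem.Dict.getD PATH_TAG_MAPPING p ("", 0)).1
    else aLoop path rest

def get_tag_for_path (path : String) : String :=
  aLoop path (PySem.List.sorted PATH_TAG_MAPPING.keys (fun s => PySem.Str.len s) true)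

-- ===== PORT B =====
-- Source B's flat module-level dict TAG_BY_PREFIX (prefix -> tag; B never needs the orders).
def TAG_BY_PREFIX : PySem.Dict String String := PySem.Dict.ofList [
  ("/api/admin/auth", "管理端-认证"),
  ("/api/admin/system/user", "管理端-系统管理-用户"),
  ("/api/admin/system/role", "管理端-系统管理-角色"),
  ("/api/admin/system/menu", "管理端-系统管理-菜单"),
  ("/api/admin/system/config", "管理端-系统管理-配置"),
  ("/api/admin/system/audit", "管理端-系统管理-审计日志"),
  ("/api/admin/data/country", "管理端-数据管理-国家"),
  ("/api/admin/dashboard", "管理端-仪表板"),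
  ("/api/iam/user", "IAM-用户管理"),
  ("/api/iam/user/profile", "IAM-用户档案"),
  ("/api/iam/user/email", "IAM-邮箱管理"),
  ("/api/iam/user/credential", "IAM-凭证管理"),
  ("/api/iam/user/session", "IAM-会话管理"),
  ("/api/iam/user/invite", "IAM-邀请管理"),
  ("/api/iam/user/country", "IAM-国家数据"),
  ("/api/fams/user/wallet", "FAMS-用户钱包"),
  ("/api/fams/bank/customer", "FAMS-银行-客户"),
  ("/api/fams/bank/account", "FAMS-银行-账户"),
  ("/api/fams/bank/account/application", "FAMS-银行-开户申请"),
  ("/api/fams/bank/deposit", "FAMS-银行-存款"),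
  ("/api/fams/bank/withdrawal", "FAMS-银行-提现"),
  ("/api/fams/agent/earnings", "FAMS-代理收益"),
  ("/api/fams/user-report", "FAMS-报表-用户报表"),
  ("/api/fams/agent-report", "FAMS-报表-代理报表"),
  ("/api/public", "公开接口")]

-- _MAX_PREFIX_LEN = max(map(len, TAG_BY_PREFIX)); the dict literal is nonempty so
-- Python's max never raises and the none branch is dead.
def MAX_PREFIX_LEN : Int :=
  match PySem.List.max? (TAG_BY_PREFIX.keys.map (fun s => PySem.Str.len s)) (fun x => x) with
  | some m => m
  | none => 0

-- Source B's 'for L in range(N, 0, -1): … if tag is not None: return tag' as structural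
-- recursion on L; path[:L] with 0 ≤ L is exactly take L of the code points.
def bSearch (path : String) : Nat → Option String
  | 0 => none
  | Nat.succ k =>
    match PySem.Dict.get? TAG_BY_PREFIX (String.ofList (path.toList.take (k + 1))) with
    | some tag => some tag
    | none => bSearch path k

def get_tag_for_path_alt (path : String) : String :=
  match bSearch path (min (PySem.Str.len path) MAX_PREFIX_LEN).toNat with
  | some tag => tag
  | none =>
    let parts := (PySem.Str.split? (PySem.Str.stripChars path "/") "/").getD []
    if 2 ≤ parts.length then
      PySem.Str.join "-" (PySem.List.slice parts (some 1) (some 3))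
    else
      "其他"

-- ===== PRECONDITION & SPEC =====
def Spec_get_tag_for_path (path : String) (out : String) : Prop := out = get_tag_for_path_alt path
instance (path : String) (out : String) : Decidable (Spec_get_tag_for_path path out) := by unfold Spec_get_tag_for_path; infer_instance

-- ===== CLAIM (what is proved, stated in full; the proofs are below) =====
def Claim_equal_get_tag_for_path : Prop := ∀ (path : String), Dom_get_tag_for_path path → Spec_get_tag_for_path path (get_tag_for_path path)

-- ===== LEMMAS AND PROOFS =====

-- Two prefixes of the same string with equal length are equal.
theorem pv_prefix_unique {path p q : String}
    (hp : PySem.Str.startswith path p = true) (hq : PySem.Str.startswith path q = true)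
    (hlen : PySem.Str.len p = PySem.Str.len q) : p = q := by
  rw [PySem.Str.startswith_eq] at hp hq
  have hp' : p.toList <+: path.toList := (PySem.Chars.startswith_iff _ _).mp hp
  have hq' : q.toList <+: path.toList := (PySem.Chars.startswith_iff _ _).mp hq
  rw [PySem.Str.len_eq, PySem.Str.len_eq] at hlen
  have hl : p.toList.length = q.toList.length := by exact_mod_cast hlen
  have hpq : p.toList <+: q.toList :=
    List.prefix_of_prefix_length_le hp' hq' (le_of_eq hl)
  exact String.toList_inj.mp (List.IsPrefix.eq_of_length hpq hl)

-- A's loop when nothing matches: it reaches the fallback.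
theorem pv_aLoop_nomatch (path : String) :
    ∀ ps : List String, (∀ p ∈ ps, PySem.Str.startswith path p = false) →
      aLoop path ps = aLoop path [] := by
  intro ps
  induction ps with
  | nil => intro _; rfl
  | cons p rest ih =>
    intro h
    have hp := h p (List.mem_cons_self ..)
    simp only [aLoop, hp]
    simp only [Bool.false_eq_true, if_false]
    exact ih (fun q hq => h q (List.mem_cons_of_mem _ hq))

-- A's loop on a length-descending list returns the table entry of any maximal match.
theorem pv_aLoop_best (path : String) :
    ∀ ps : List String,
      ps.Pairwise (fun a b => PySem.Str.len b ≤ PySem.Str.len a) →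
      ∀ p ∈ ps, PySem.Str.startswith path p = true →
      (∀ q ∈ ps, PySem.Str.startswith path q = true → PySem.Str.len q ≤ PySem.Str.len p) →
      aLoop path ps = (PySem.Dict.getD PATH_TAG_MAPPING p ("", 0)).1 := by
  intro ps
  induction ps with
  | nil => intro _ p hp; cases hp
  | cons h0 rest ih =>
    intro hpw p hp hm hmax
    by_cases hs : PySem.Str.startswith path h0 = true
    · have hle : PySem.Str.len h0 ≤ PySem.Str.len p := hmax h0 (List.mem_cons_self ..) hs
      have hge : PySem.Str.len p ≤ PySem.Str.len h0 := by
        rcases List.mem_cons.mp hp with rfl | hp'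
        · exact le_rfl
        · exact (List.pairwise_cons.mp hpw).1 p hp'
      have hpe : h0 = p := pv_prefix_unique hs hm (le_antisymm hle hge)
      simp only [aLoop]; rw [hpe, if_pos hm]
    · have hs' : PySem.Str.startswith path h0 = false := by simpa using hs
      have hp' : p ∈ rest := by
        rcases List.mem_cons.mp hp with rfl | hp'
        · rw [hs'] at hm; cases hm
        · exact hp'
      simp only [aLoop, hs', Bool.false_eq_true, if_false]
      exact ih (List.pairwise_cons.mp hpw).2 p hp' hm
        (fun q hq hmq => hmax q (List.mem_cons_of_mem _ hq) hmq)

theorem pv_keys_nodup : PATH_TAG_MAPPING.keys.Nodup := by decide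
theorem pv_keysB_nodup : TAG_BY_PREFIX.keys.Nodup := by decide
theorem pv_keys_eq : TAG_BY_PREFIX.keys = PATH_TAG_MAPPING.keys := by decide
theorem pv_items_map :
    TAG_BY_PREFIX.items = PATH_TAG_MAPPING.items.map (fun kv => (kv.1, kv.2.1)) := by decide
theorem pv_key_len_le : ∀ p ∈ PATH_TAG_MAPPING.keys, PySem.Str.len p ≤ MAX_PREFIX_LEN := by decide
theorem pv_key_len_pos : ∀ p ∈ PATH_TAG_MAPPING.keys, 1 ≤ PySem.Str.len p := by decide
theorem pv_max_nonneg : 0 ≤ MAX_PREFIX_LEN := by decide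

-- a string built from a take of path's code points is a prefix of path
theorem pv_take_startswith (path : String) (L : Nat) :
    PySem.Str.startswith path (String.ofList (path.toList.take L)) = true := by
  rw [PySem.Str.startswith_eq]
  exact (PySem.Chars.startswith_iff _ _).mpr (by simpa using List.take_prefix L path.toList)

-- bSearch misses: no admissible prefix length is a key
theorem pv_bSearch_none (path : String) :
    ∀ N : Nat,
      (∀ L : Nat, 1 ≤ L → L ≤ N →
        PySem.Dict.get? TAG_BY_PREFIX (String.ofList (path.toList.take L)) = none) →
      bSearch path N = none := by
  intro N
  induction N with
  | zero => intro _; rfl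
  | succ k ih =>
    intro h
    have hk := h (k + 1) (by omega) (by omega)
    simp only [bSearch, hk]
    exact ih (fun L h1 h2 => h L h1 (by omega))

-- bSearch hits the largest admissible prefix length that is a key
theorem pv_bSearch_found (path : String) (L0 : Nat) (t : String)
    (h1 : 1 ≤ L0)
    (ht : PySem.Dict.get? TAG_BY_PREFIX (String.ofList (path.toList.take L0)) = some t) :
    ∀ N : Nat, L0 ≤ N →
      (∀ L : Nat, L0 < L → L ≤ N →
        PySem.Dict.get? TAG_BY_PREFIX (String.ofList (path.toList.take L)) = none) →
      bSearch path N = some t := by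
  intro N
  induction N with
  | zero => intro h; omega
  | succ k ih =>
    intro hle hnone
    by_cases he : L0 = k + 1
    · subst he
      simp only [bSearch, ht]
    · have hk1 : PySem.Dict.get? TAG_BY_PREFIX (String.ofList (path.toList.take (k + 1))) = none :=
        hnone (k + 1) (by omega) (by omega)
      simp only [bSearch, hk1]
      exact ih (by omega) (fun L ha hb => hnone L ha (by omega))

-- slice xs[1:3] in closed form
theorem pv_slice13 {α : Type} (xs : List α) :
    PySem.List.slice xs (some 1) (some 3) = List.take 2 (List.drop 1 xs) := by
  rw [show (1:Int) = ((1:Nat):Int) by norm_num, show ((3:Int)) = ((3:Nat):Int) by norm_num,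
      PySem.List.slice_natCast]

-- both fallbacks compute the same string
theorem pv_fallback_eq (parts : List String) :
    (if 3 ≤ parts.length then
      PySem.List.pyGetD parts 1 "" ++ "-" ++ PySem.List.pyGetD parts 2 ""
    else if 2 ≤ parts.length then
      PySem.List.pyGetD parts 1 ""
    else
      "其他")
    = (if 2 ≤ parts.length then
        PySem.Str.join "-" (PySem.List.slice parts (some 1) (some 3))
      else
        "其他") := by
  match parts with
  | [] => rfl
  | [a] => rfl
  | [a, b] =>
    have h3 : ¬ (3 ≤ ([a, b] : List String).length) := by simp
    have h2 : 2 ≤ ([a, b] : List String).length := by simp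
    rw [if_neg h3, if_pos h2, if_pos h2, pv_slice13, PySem.List.pyGetD_ofNat']
    simp [PySem.Str.join]
  | a :: b :: c :: rest =>
    have h3 : 3 ≤ (a :: b :: c :: rest).length := by simp
    have h2 : 2 ≤ (a :: b :: c :: rest).length := by simp
    rw [if_pos h3, if_pos h2, pv_slice13, PySem.List.pyGetD_ofNat', PySem.List.pyGetD_ofNat']
    apply String.toList_inj.mp
    simp [PySem.Str.toList_join, PySem.Chars.join_cons_cons, PySem.Chars.join_singleton]

theorem pv_mem_keysB_of_get?_some {s t : String}
    (h : PySem.Dict.get? TAG_BY_PREFIX s = some t) : s ∈ PATH_TAG_MAPPING.keys := by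
  rw [← pv_keys_eq]
  exact PySem.Dict.mem_keys_of_mem_items _ (PySem.Dict.mem_items_of_get?_eq_some _ h)

-- when bSearch misses, B's code after the loop equals A's code after the loop
theorem pv_alt_fallback (path : String)
    (hB : bSearch path (min (PySem.Str.len path) MAX_PREFIX_LEN).toNat = none) :
    get_tag_for_path_alt path = aLoop path [] := by
  simp only [get_tag_for_path_alt, hB, aLoop]
  exact (pv_fallback_eq _).symm

-- nonnegativity facts for the loop bound
theorem pv_len_nonneg (s : String) : 0 ≤ PySem.Str.len s := by
  rw [PySem.Str.len_eq]; exact Int.natCast_nonneg _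

theorem pv_bound_cast (path : String) :
    (((min (PySem.Str.len path) MAX_PREFIX_LEN).toNat : Nat) : Int)
      = min (PySem.Str.len path) MAX_PREFIX_LEN :=
  Int.toNat_of_nonneg (le_min (pv_len_nonneg path) pv_max_nonneg)

-- ===== VERDICT (by name: the statement is the Claim_ definition above) =====
theorem get_tag_for_path_spec : Claim_equal_get_tag_for_path := by
  intro path _
  unfold Spec_get_tag_for_path
  by_cases hex : ∃ p ∈ PATH_TAG_MAPPING.keys, PySem.Str.startswith path p = true
  · -- some key is a prefix of path: both sides return the tag of the longest one
    obtain ⟨p0, hp0, hm0⟩ := hex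
    have hmem : p0 ∈ PATH_TAG_MAPPING.keys.filter (fun q => PySem.Str.startswith path q) :=
      List.mem_filter.mpr ⟨hp0, hm0⟩
    obtain ⟨p, hp⟩ : ∃ p, PySem.List.max?
        (PATH_TAG_MAPPING.keys.filter (fun q => PySem.Str.startswith path q))
        (fun s => PySem.Str.len s) = some p := by
      cases h : PySem.List.max?
          (PATH_TAG_MAPPING.keys.filter (fun q => PySem.Str.startswith path q))
          (fun s => PySem.Str.len s) with
      | some p => exact ⟨p, rfl⟩
      | none =>
        rw [PySem.List.max?_eq_none_iff] at h
        rw [h] at hmem; cases hmem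
    have hpms := PySem.List.max?_mem hp
    have hpk : p ∈ PATH_TAG_MAPPING.keys := (List.mem_filter.mp hpms).1
    have hpm : PySem.Str.startswith path p = true := by
      simpa using (List.mem_filter.mp hpms).2
    have hmax : ∀ q ∈ PATH_TAG_MAPPING.keys, PySem.Str.startswith path q = true →
        PySem.Str.len q ≤ PySem.Str.len p := by
      intro q hq hqm
      exact PySem.List.max?_isMax hp q (List.mem_filter.mpr ⟨hq, hqm⟩)
    -- A returns the table entry of p
    have hA : get_tag_for_path path = (PySem.Dict.getD PATH_TAG_MAPPING p ("", 0)).1 := by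
      apply pv_aLoop_best path _ (PySem.List.sorted_pairwise_rev _ _) p
      · rw [PySem.List.mem_sorted]; exact hpk
      · exact hpm
      · intro q hq hqm
        exact hmax q ((PySem.List.mem_sorted _ _ _ _).mp hq) hqm
    obtain ⟨kv, hkv, hfst⟩ := List.mem_map.mp hpk
    have hpkv : (p, kv.2) ∈ PATH_TAG_MAPPING.items := by rw [← hfst]; simpa using hkv
    -- B's dict holds the tag of p
    have hBt : PySem.Dict.get? TAG_BY_PREFIX p = some kv.2.1 := by
      apply PySem.Dict.get?_of_mem_items _ ?_ pv_keysB_nodup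
      rw [pv_items_map]
      exact List.mem_map.mpr ⟨(p, kv.2), hpkv, rfl⟩
    -- p is exactly the prefix of path of its own length
    have hpre : p.toList <+: path.toList := by
      rw [PySem.Str.startswith_eq] at hpm
      exact (PySem.Chars.startswith_iff _ _).mp hpm
    have htake : path.toList.take p.toList.length = p.toList :=
      (List.prefix_iff_eq_take.mp hpre).symm
    have hBt' : PySem.Dict.get? TAG_BY_PREFIX
        (String.ofList (path.toList.take p.toList.length)) = some kv.2.1 := by
      rw [htake, String.ofList_toList]; exact hBt
    have h1 : 1 ≤ p.toList.length := by
      have := pv_key_len_pos p hpk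
      rw [PySem.Str.len_eq] at this; exact_mod_cast this
    have hLpN : p.toList.length ≤ (min (PySem.Str.len path) MAX_PREFIX_LEN).toNat := by
      have hle1 : (p.toList.length : Int) ≤ PySem.Str.len path := by
        rw [PySem.Str.len_eq]; exact_mod_cast hpre.length_le
      have hle2 : (p.toList.length : Int) ≤ MAX_PREFIX_LEN := by
        have := pv_key_len_le p hpk
        rwa [PySem.Str.len_eq] at this
      have := pv_bound_cast path
      omega
    have hnone : ∀ L : Nat, p.toList.length < L →
        L ≤ (min (PySem.Str.len path) MAX_PREFIX_LEN).toNat →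
        PySem.Dict.get? TAG_BY_PREFIX (String.ofList (path.toList.take L)) = none := by
      intro L hgt hLN
      cases hq : PySem.Dict.get? TAG_BY_PREFIX (String.ofList (path.toList.take L)) with
      | none => rfl
      | some t =>
        exfalso
        have hk : String.ofList (path.toList.take L) ∈ PATH_TAG_MAPPING.keys :=
          pv_mem_keysB_of_get?_some hq
        have hmatch := pv_take_startswith path L
        have hle := hmax _ hk hmatch
        have hLlen : L ≤ path.toList.length := by
          have hcast := pv_bound_cast path
          have hmin : min (PySem.Str.len path) MAX_PREFIX_LEN ≤ PySem.Str.len path :=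
            min_le_left _ _
          have hlen := PySem.Str.len_eq path
          omega
        rw [PySem.Str.len_eq, PySem.Str.len_eq, String.toList_ofList,
            List.length_take_of_le hLlen] at hle
        have : L ≤ p.toList.length := by exact_mod_cast hle
        omega
    have hsearch : bSearch path (min (PySem.Str.len path) MAX_PREFIX_LEN).toNat
        = some kv.2.1 :=
      pv_bSearch_found path p.toList.length kv.2.1 h1 hBt' _ hLpN hnone
    rw [hA, PySem.Dict.getD_of_mem_items _ hpkv pv_keys_nodup]
    simp only [get_tag_for_path_alt, hsearch]
  · -- no key matches: both sides run their fallback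
    have hnom : ∀ p ∈ PATH_TAG_MAPPING.keys, PySem.Str.startswith path p = false := by
      intro p hp
      by_contra h
      exact hex ⟨p, hp, by simpa using h⟩
    have hA : get_tag_for_path path = aLoop path [] := by
      apply pv_aLoop_nomatch
      intro p hp
      exact hnom p ((PySem.List.mem_sorted _ _ _ _).mp hp)
    have hB : bSearch path (min (PySem.Str.len path) MAX_PREFIX_LEN).toNat = none := by
      apply pv_bSearch_none
      intro L h1 hL
      cases hq : PySem.Dict.get? TAG_BY_PREFIX (String.ofList (path.toList.take L)) with
      | none => rfl
      | some t =>
        exfalso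
        have hk := pv_mem_keysB_of_get?_some hq
        have := hnom _ hk
        rw [pv_take_startswith path L] at this
        cases this
    rw [hA, pv_alt_fallback path hB]
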